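-- pv_equiv track=rewrite | github.com/hongquyngo/vti_production | utils/bom/common.py | count_materials_by_type
-- ===== SOURCE A (Python) =====
-- from typing import Union, Optional, Dict, Any, Tuple, List
--
-- def count_materials_by_type(materials: list) -> Dict[str, int]:
--     """
--     Count materials by type
--
--     Args:
--         materials: List of material dictionaries with 'material_type' key
--
--     Returns:
--         Dictionary with counts: {'RAW_MATERIAL': n, 'PACKAGING': n, 'CONSUMABLE': n}
--     """
--     counts = {
--         'RAW_MATERIAL': 0,
--         'PACKAGING': 0,
--         'CONSUMABLE': 0
--     }
--
--     for material in materials: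
--         mat_type = material.get('material_type', 'RAW_MATERIAL')
--         if mat_type in counts:
--             counts[mat_type] += 1
--
--     return counts
-- ===== SOURCE B (Python) =====
-- def count_materials_by_type(materials: list):
--     return {t: sum(1 for m in materials
--                    if m.get('material_type', 'RAW_MATERIAL') == t)
--             for t in ('RAW_MATERIAL', 'PACKAGING', 'CONSUMABLE')}
-- ===== Notes on version B (the rewrite author's own statement) =====
-- stated objective: idiomatic
-- what changed: Replaces the mutable-counter loop with a dict comprehension that counts each of the three fixed categories by a separate scan (sum of a generator), so no dict is mutated and unknown types fall out automatically.
import Mathlib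
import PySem

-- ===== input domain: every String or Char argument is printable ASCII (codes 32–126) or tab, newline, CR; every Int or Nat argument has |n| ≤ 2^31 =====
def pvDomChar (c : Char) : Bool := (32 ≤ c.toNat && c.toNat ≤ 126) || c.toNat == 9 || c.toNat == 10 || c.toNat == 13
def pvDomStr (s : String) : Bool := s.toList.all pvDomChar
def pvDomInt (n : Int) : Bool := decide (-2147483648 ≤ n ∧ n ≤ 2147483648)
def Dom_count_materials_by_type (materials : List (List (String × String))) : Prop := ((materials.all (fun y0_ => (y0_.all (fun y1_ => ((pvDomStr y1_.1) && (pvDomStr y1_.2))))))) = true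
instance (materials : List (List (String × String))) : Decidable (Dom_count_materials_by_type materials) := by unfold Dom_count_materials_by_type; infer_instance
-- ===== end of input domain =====

-- B replaces A's single mutable-counter loop with a dict comprehension counting each of the
-- three fixed categories by its own scan (objective: idiomatic; same cost class).

-- ===== PORT A =====
-- material.get('material_type', 'RAW_MATERIAL')  (shared literal helper: both Pythons use this call)
def pvMatType (m : List (String × String)) : String :=
  (PySem.Dict.mk m).getD "material_type" "RAW_MATERIAL"

-- A's loop body: if mat_type in counts: counts[mat_type] += 1
def pvStepA (d : PySem.Dict String Int) (material : List (String × String)) : PySem.Dict String Int :=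
  let mat_type := pvMatType material
  if d.contains mat_type then d.modify mat_type 0 (· + 1) else d

def count_materials_by_type (materials : List (List (String × String))) : List (String × Int) :=
  let counts : PySem.Dict String Int :=
    PySem.Dict.mk [("RAW_MATERIAL", 0), ("PACKAGING", 0), ("CONSUMABLE", 0)]
  (materials.foldl pvStepA counts).items

-- ===== PORT B =====
-- sum(1 for m in materials if m.get('material_type', 'RAW_MATERIAL') == t)
def pvSumB (materials : List (List (String × String))) (t : String) : Int :=
  materials.foldl (fun acc m => if pvMatType m == t then acc + 1 else acc) 0

-- {t: sum(...) for t in ('RAW_MATERIAL', 'PACKAGING', 'CONSUMABLE')}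
def count_materials_by_type_alt (materials : List (List (String × String))) : List (String × Int) :=
  ["RAW_MATERIAL", "PACKAGING", "CONSUMABLE"].map (fun t => (t, pvSumB materials t))

-- ===== PRECONDITION & SPEC =====
def Spec_count_materials_by_type (materials : List (List (String × String))) (out : List (String × Int)) : Prop := out = count_materials_by_type_alt materials
instance (materials : List (List (String × String))) (out : List (String × Int)) : Decidable (Spec_count_materials_by_type materials out) := by unfold Spec_count_materials_by_type; infer_instance

-- ===== CLAIM (what is proved, stated in full; the proofs are below) =====
def Claim_equal_count_materials_by_type : Prop := ∀ (materials : List (List (String × String))), Dom_count_materials_by_type materials → Spec_count_materials_by_type materials (count_materials_by_type materials)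

-- ===== LEMMAS AND PROOFS =====
-- B's per-category tally started at a equals a plus the tally started at 0.
theorem pvSumB_shift (l : List (List (String × String))) (t : String) (a : Int) :
    l.foldl (fun acc m => if pvMatType m == t then acc + 1 else acc) a = a + pvSumB l t := by
  induction l generalizing a with
  | nil => simp [pvSumB]
  | cons m l ih =>
    simp only [pvSumB, List.foldl_cons]
    rw [ih, ih]
    split <;> ring

theorem pvSumB_cons (m : List (String × String)) (l : List (List (String × String))) (t : String) :
    pvSumB (m :: l) t = (if pvMatType m == t then (1:Int) else 0) + pvSumB l t := by
  show l.foldl _ _ = _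
  rw [pvSumB_shift]
  by_cases h : (pvMatType m == t) = true <;> simp [h]

-- Invariant of A's loop: it keeps exactly the three initial keys, each incremented
-- by B's per-category tally of the processed prefix.
theorem loopA (l : List (List (String × String))) (a b c : Int) :
    l.foldl pvStepA (PySem.Dict.mk [("RAW_MATERIAL", a), ("PACKAGING", b), ("CONSUMABLE", c)]) =
    PySem.Dict.mk [("RAW_MATERIAL", a + pvSumB l "RAW_MATERIAL"),
                   ("PACKAGING", b + pvSumB l "PACKAGING"),
                   ("CONSUMABLE", c + pvSumB l "CONSUMABLE")] := by
  induction l generalizing a b c with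
  | nil => simp [pvSumB]
  | cons m l ih =>
    rw [List.foldl_cons]
    by_cases hR : pvMatType m = "RAW_MATERIAL"
    · have hstep : pvStepA (PySem.Dict.mk [("RAW_MATERIAL", a), ("PACKAGING", b), ("CONSUMABLE", c)]) m
          = PySem.Dict.mk [("RAW_MATERIAL", a + 1), ("PACKAGING", b), ("CONSUMABLE", c)] := by
        simp [pvStepA, hR, PySem.Dict.contains, PySem.Dict.modify, PySem.Dict.getD,
              PySem.Dict.get?, PySem.Dict.insert]
      rw [hstep, ih]
      simp [pvSumB_cons, hR]
      omega
    · by_cases hP : pvMatType m = "PACKAGING"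
      · have hstep : pvStepA (PySem.Dict.mk [("RAW_MATERIAL", a), ("PACKAGING", b), ("CONSUMABLE", c)]) m
            = PySem.Dict.mk [("RAW_MATERIAL", a), ("PACKAGING", b + 1), ("CONSUMABLE", c)] := by
          simp [pvStepA, hP, PySem.Dict.contains, PySem.Dict.modify, PySem.Dict.getD,
                PySem.Dict.get?, PySem.Dict.insert]
        rw [hstep, ih]
        simp [pvSumB_cons, hP]
        omega
      · by_cases hC : pvMatType m = "CONSUMABLE"
        · have hstep : pvStepA (PySem.Dict.mk [("RAW_MATERIAL", a), ("PACKAGING", b), ("CONSUMABLE", c)]) m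
              = PySem.Dict.mk [("RAW_MATERIAL", a), ("PACKAGING", b), ("CONSUMABLE", c + 1)] := by
            simp [pvStepA, hC, PySem.Dict.contains, PySem.Dict.modify, PySem.Dict.getD,
                  PySem.Dict.get?, PySem.Dict.insert]
          rw [hstep, ih]
          simp [pvSumB_cons, hC]
          omega
        · have hstep : pvStepA (PySem.Dict.mk [("RAW_MATERIAL", a), ("PACKAGING", b), ("CONSUMABLE", c)]) m
              = PySem.Dict.mk [("RAW_MATERIAL", a), ("PACKAGING", b), ("CONSUMABLE", c)] := by
            simp only [pvStepA]
            rw [if_neg]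
            simp [PySem.Dict.contains]
            exact ⟨fun h => hR h.symm, fun h => hP h.symm, fun h => hC h.symm⟩
          rw [hstep, ih]
          simp [pvSumB_cons, hR, hP, hC]

-- ===== VERDICT (by name: the statement is the Claim_ definition above) =====
theorem count_materials_by_type_spec : Claim_equal_count_materials_by_type := by
  intro materials _
  unfold Spec_count_materials_by_type
  show (materials.foldl pvStepA (PySem.Dict.mk [("RAW_MATERIAL", 0), ("PACKAGING", 0), ("CONSUMABLE", 0)])).items = _
  rw [loopA]
  simp [count_materials_by_type_alt]
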